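-- pv_equiv track=rewrite | github.com/ChoiHyebin/algorithm | 프로그래머스/0/120830. 양꼬치/양꼬치.py | solution
-- ===== SOURCE A (Python) =====
-- def solution(n, k):
--     answer = 0
--     cnt = 0
--
--     for i in range(1, n+1):
--         if i%10 == 0:
--             cnt += 1
--
--     k = k - cnt
--
--     answer = n*12000 + k*2000
--
--     return answer
-- ===== SOURCE B (Python) =====
-- def solution(n, k):
--     # closed form: number of multiples of 10 in 1..n is n//10 (0 when n < 0)
--     cnt = max(n, 0) // 10
--     return n * 12000 + (k - cnt) * 2000
-- ===== Notes on version B (the rewrite author's own statement) =====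
-- stated objective: faster
-- what changed: Replaced the O(n) loop counting multiples of 10 in 1..n with the closed form max(n,0)//10.
import Mathlib
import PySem

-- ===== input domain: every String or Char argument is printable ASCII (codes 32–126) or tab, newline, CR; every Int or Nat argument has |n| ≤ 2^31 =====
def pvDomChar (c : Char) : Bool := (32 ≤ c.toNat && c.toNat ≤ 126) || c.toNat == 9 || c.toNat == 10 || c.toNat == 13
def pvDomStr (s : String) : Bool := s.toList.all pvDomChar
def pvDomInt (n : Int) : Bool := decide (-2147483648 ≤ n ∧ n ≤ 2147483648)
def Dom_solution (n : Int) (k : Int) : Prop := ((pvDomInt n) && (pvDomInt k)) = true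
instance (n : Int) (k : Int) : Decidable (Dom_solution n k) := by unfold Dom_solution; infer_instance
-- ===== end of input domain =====

-- B replaces A's O(n) loop counting multiples of 10 with the closed form max(n,0)//10 (faster, asymptotic).


-- ===== PORT A =====
def solution (n : Int) (k : Int) : Int :=
  let answer : Int := 0
  let cnt : Int := 0
  let cnt := (PySem.List.pyRange 1 (n+1) 1).foldl
    (fun c i => if PySem.Int.mod i 10 = 0 then c + 1 else c) cnt
  let k := k - cnt
  let answer := n * 12000 + k * 2000
  answer

-- ===== PORT B =====
def solution_alt (n : Int) (k : Int) : Int :=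
  let cnt := PySem.Int.floordiv (max n 0) 10
  n * 12000 + (k - cnt) * 2000

-- ===== PRECONDITION & SPEC =====
def Spec_solution (n : Int) (k : Int) (out : Int) : Prop := out = solution_alt n k
instance (n : Int) (k : Int) (out : Int) : Decidable (Spec_solution n k out) := by unfold Spec_solution; infer_instance

-- ===== CLAIM (what is proved, stated in full; the proofs are below) =====
def Claim_equal_solution : Prop := ∀ (n : Int) (k : Int), Dom_solution n k → Spec_solution n k (solution n k)

-- ===== LEMMAS AND PROOFS =====
-- The loop over range(1, n+1) counts the multiples of 10, which is ⌊n/10⌋ for n ≥ 0.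
theorem pv_count_mul10 (m : Nat) :
    (PySem.List.pyRange 1 ((m : Int) + 1) 1).foldl
      (fun c i => if PySem.Int.mod i 10 = 0 then c + 1 else c) (0 : Int)
    = PySem.Int.floordiv (m : Int) 10 := by
  induction m with
  | zero => simp [PySem.List.pyRange_one_eq_nil, PySem.Int.floordiv]
  | succ m ih =>
    rw [show ((m + 1 : Nat) : Int) + 1 = ((m : Int) + 1) + 1 by push_cast; ring,
        PySem.List.pyRange_one_succ_right (by omega), List.foldl_append, ih]
    simp only [List.foldl]
    rw [PySem.Int.floordiv_eq_ediv_of_pos (by norm_num),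
        PySem.Int.floordiv_eq_ediv_of_pos (by norm_num),
        PySem.Int.mod_eq_emod_of_pos (by norm_num)]
    rcases Int.emod_emod_of_dvd ((m : Int) + 1) (dvd_refl 10) with _
    by_cases h : ((m : Int) + 1) % 10 = 0 <;> simp [h] <;> omega

theorem pv_loop_nonpos (n : Int) (h : n ≤ 0) :
    (PySem.List.pyRange 1 (n+1) 1).foldl
      (fun c i => if PySem.Int.mod i 10 = 0 then c + 1 else c) (0 : Int) = 0 := by
  rw [PySem.List.pyRange_one_eq_nil (by omega)]
  rfl

-- ===== VERDICT (by name: the statement is the Claim_ definition above) =====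
theorem solution_spec : Claim_equal_solution := by
  intro n k _
  simp only [Spec_solution, solution, solution_alt]
  by_cases hn : 0 ≤ n
  · obtain ⟨m, rfl⟩ := Int.eq_ofNat_of_zero_le hn
    rw [pv_count_mul10 m, max_eq_left (by omega)]
  · rw [pv_loop_nonpos n (by omega), max_eq_right (by omega)]
    simp [PySem.Int.floordiv]
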